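-- pv_equiv track=rewrite | github.com/cmccandless/stunning-pancake | 0/0/3.py | highest_prime_factor_under
-- ===== SOURCE A (Python) =====
-- from math import sqrt
--
-- def highest_prime_factor_under(target):
--     notPrime = set()
--     result = 1
--     limit = round(sqrt(target))
--     for i in range(2, limit):
--         if i in notPrime:
--             continue
--         if target % i == 0:
--             result = i
--         for j in range(i, limit, i):
--             notPrime.add(j)
--     return result
-- ===== SOURCE B (Python) =====
-- from math import sqrt
--
--
-- def highest_prime_factor_under(target):
--     result = 1
--     limit = round(sqrt(target))
--     for i in range(2, limit):
--         if target % i == 0 and all(i % d != 0 for d in range(2, i)):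
--             result = i
--     return result
-- ===== Notes on version B (the rewrite author's own statement) =====
-- stated objective: simpler
-- what changed: Replaces the incrementally-built sieve set (inner loop marking multiples, membership test + continue) with a single loop that trial-divides each divisor candidate for primality; no set is built or maintained.
import Mathlib
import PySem

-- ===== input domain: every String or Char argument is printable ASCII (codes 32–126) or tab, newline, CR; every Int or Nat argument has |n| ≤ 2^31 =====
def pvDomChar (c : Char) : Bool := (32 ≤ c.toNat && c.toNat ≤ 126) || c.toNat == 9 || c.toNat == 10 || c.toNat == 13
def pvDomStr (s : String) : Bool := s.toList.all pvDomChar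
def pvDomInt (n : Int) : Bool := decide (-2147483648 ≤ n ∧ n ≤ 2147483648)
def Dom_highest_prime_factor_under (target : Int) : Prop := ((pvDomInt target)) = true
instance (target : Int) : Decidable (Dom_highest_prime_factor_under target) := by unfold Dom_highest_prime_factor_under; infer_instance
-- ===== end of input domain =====

-- B replaces A's incrementally built sieve set with a direct trial-division primality test
-- inside a single loop (objective: simpler — no set is built or maintained).

-- round(sqrt(target)), shared by both Pythons; exact for 0 ≤ target ≤ 2^31: the double sqrt is
-- within 0.5 ulp (< 2^-37 here) of the real square root, while the real square root of an
-- integer is never closer than 1/(4*sqrt(target)) > 2^-20 to a half-integer, so Python's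
-- round(sqrt(target)) is the integer nearest to the real square root, computed here exactly.
def pvRoundSqrt (target : Int) : Int :=
  let k : Int := (Nat.sqrt target.toNat : Int)
  if target ≤ k * k + k then k else k + 1

-- ===== PORT A =====
def pvStepA (target limit : Int) (st : PySem.Set Int × Int) (i : Int) : PySem.Set Int × Int :=
  if PySem.Set.contains st.1 i then st           -- "if i in notPrime: continue"
  else
    let result := if PySem.Int.mod target i == 0 then i else st.2
    let notPrime := (PySem.List.pyRange i limit i).foldl (fun np j => PySem.Set.add np j) st.1
    (notPrime, result)

def highest_prime_factor_under (target : Int) : Int :=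
  let limit := pvRoundSqrt target
  ((PySem.List.pyRange 2 limit 1).foldl (pvStepA target limit) (PySem.Set.empty, 1)).2

-- ===== PORT B =====
def pvStepB (target : Int) (result i : Int) : Int :=
  if PySem.Int.mod target i == 0 &&
      ((PySem.List.pyRange 2 i 1).all fun d => PySem.Int.mod i d != 0)
  then i else result

def highest_prime_factor_under_alt (target : Int) : Int :=
  let limit := pvRoundSqrt target
  (PySem.List.pyRange 2 limit 1).foldl (pvStepB target) 1

-- ===== PRECONDITION & SPEC =====
-- Pre_ excludes target < 0, on which Python's sqrt (hence A and B alike) raises ValueError.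
def Pre_highest_prime_factor_under (target : Int) : Prop := 0 ≤ target
instance (target : Int) : Decidable (Pre_highest_prime_factor_under target) := by unfold Pre_highest_prime_factor_under; infer_instance
def pvWitness_highest_prime_factor_under : Int := 100
def Spec_highest_prime_factor_under (target : Int) (out : Int) : Prop := out = highest_prime_factor_under_alt target
instance (target : Int) (out : Int) : Decidable (Spec_highest_prime_factor_under target out) := by unfold Spec_highest_prime_factor_under; infer_instance

-- ===== CLAIM (what is proved, stated in full; the proofs are below) =====
def Claim_equal_highest_prime_factor_under : Prop := ∀ (target : Int), Dom_highest_prime_factor_under target → Pre_highest_prime_factor_under target → Spec_highest_prime_factor_under target (highest_prime_factor_under target)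

-- ===== LEMMAS AND PROOFS =====

-- Loop invariant, A's fold state after processing i = 2 .. m-1 (any limit L):
-- its result component equals B's fold, and x ∈ notPrime iff x is a multiple of some
-- d ∈ [2, m) with d ≤ x < L.
lemma pv_inv (target L : Int) (n : Nat) (h : 2 + (n : Int) ≤ L) :
    (((PySem.List.pyRange 2 (2 + (n : Int)) 1).foldl (pvStepA target L) (PySem.Set.empty, 1)).2
        = (PySem.List.pyRange 2 (2 + (n : Int)) 1).foldl (pvStepB target) 1)
    ∧ (∀ x : Int,
        x ∈ ((PySem.List.pyRange 2 (2 + (n : Int)) 1).foldl (pvStepA target L) (PySem.Set.empty, 1)).1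
          ↔ ∃ d : Int, 2 ≤ d ∧ d < 2 + (n : Int) ∧ d ∣ x ∧ d ≤ x ∧ x < L) := by
  induction n with
  | zero =>
      constructor
      · simp [PySem.List.pyRange_one_eq_nil (by norm_num : (2:Int) ≤ 2)]
      · intro x
        simp [PySem.List.pyRange_one_eq_nil (by norm_num : (2:Int) ≤ 2), PySem.Set.empty]
        intro d h2 hd; omega
  | succ n ih =>
      have hm : (2:Int) + (n:Int) < L := by push_cast at h ⊢; omega
      obtain ⟨ihr, ihs⟩ := ih (le_of_lt hm)
      set m : Int := 2 + (n : Int) with hmdef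
      have hsplit : PySem.List.pyRange 2 (2 + ((n:Nat)+1 : Nat) : Int) 1
          = PySem.List.pyRange 2 m 1 ++ [m] := by
        have : (2 + ((n:Nat)+1 : Nat) : Int) = m + 1 := by push_cast; ring
        rw [this, PySem.List.pyRange_one_succ_right (by omega : (2:Int) ≤ m)]
      rw [hsplit, List.foldl_append, List.foldl_append]
      simp only [List.foldl_cons, List.foldl_nil]
      set stA := (PySem.List.pyRange 2 m 1).foldl (pvStepA target L) (PySem.Set.empty, 1) with hstA
      set rB := (PySem.List.pyRange 2 m 1).foldl (pvStepB target) 1 with hrB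
      -- the skip test of A at i = m equals the failure of B's primality test at i = m
      have hmem : m ∈ stA.1 ↔ ∃ d : Int, 2 ≤ d ∧ d < m ∧ d ∣ m := by
        rw [ihs m]
        constructor
        · rintro ⟨d, h1, h2, h3, _, _⟩; exact ⟨d, h1, h2, h3⟩
        · rintro ⟨d, h1, h2, h3⟩; exact ⟨d, h1, h2, h3, by omega, hm⟩
      have hall : (((PySem.List.pyRange 2 m 1).all fun d => PySem.Int.mod m d != 0) = true)
          ↔ ¬ ∃ d : Int, 2 ≤ d ∧ d < m ∧ d ∣ m := by
        rw [List.all_eq_true]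
        constructor
        · rintro hA ⟨d, h1, h2, h3⟩
          have := hA d (by rw [PySem.List.mem_pyRange_one]; exact ⟨h1, h2⟩)
          rw [bne_iff_ne] at this
          exact this ((PySem.Int.mod_eq_zero_iff_dvd m d).mpr h3)
        · intro hno d hd
          rw [PySem.List.mem_pyRange_one] at hd
          rw [bne_iff_ne]
          intro hz
          exact hno ⟨d, hd.1, hd.2, (PySem.Int.mod_eq_zero_iff_dvd m d).mp hz⟩
      by_cases hskip : m ∈ stA.1
      · -- A skips m; B's primality test fails, so neither result changes
        obtain ⟨d0, hd01, hd02, hd03⟩ := hmem.mp hskip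
        have hcont : PySem.Set.contains stA.1 m = true :=
          (PySem.Set.contains_iff stA.1 m).mpr hskip
        have hallF : ((PySem.List.pyRange 2 m 1).all fun d => PySem.Int.mod m d != 0) = false := by
          rcases Bool.eq_false_or_eq_true ((PySem.List.pyRange 2 m 1).all fun d => PySem.Int.mod m d != 0) with ht | hf
          · exact absurd ⟨d0, hd01, hd02, hd03⟩ (hall.mp ht)
          · exact hf
        constructor
        · rw [pvStepA, pvStepB, hcont, if_pos rfl, hallF, Bool.and_false, if_neg (by simp)]
          exact ihr
        · intro x
          rw [pvStepA, hcont, if_pos rfl, ihs x]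
          constructor
          · rintro ⟨d, h1, h2, h3, h4, h5⟩; exact ⟨d, h1, by omega, h3, h4, h5⟩
          · rintro ⟨d, h1, h2, h3, h4, h5⟩
            by_cases hdm : d < m
            · exact ⟨d, h1, hdm, h3, h4, h5⟩
            · have hdm' : d = m := by omega
              have hd0x : d0 ∣ x := hd03.trans (hdm' ▸ h3)
              refine ⟨d0, hd01, by omega, hd0x, Int.le_of_dvd (by omega) hd0x, h5⟩
      · -- A processes m; B's primality test succeeds
        have hcont : PySem.Set.contains stA.1 m = false := by
          rcases Bool.eq_false_or_eq_true (PySem.Set.contains stA.1 m) with ht | hf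
          · exact absurd ((PySem.Set.contains_iff stA.1 m).mp ht) hskip
          · exact hf
        have hallT : ((PySem.List.pyRange 2 m 1).all fun d => PySem.Int.mod m d != 0) = true := by
          rcases Bool.eq_false_or_eq_true ((PySem.List.pyRange 2 m 1).all fun d => PySem.Int.mod m d != 0) with ht | hf
          · exact ht
          · exfalso
            apply hskip
            rw [hmem]
            by_contra hno
            exact absurd (hall.mpr hno) (by simp [hf])
        constructor
        · rw [pvStepA, pvStepB, hcont, if_neg (by simp), hallT, Bool.and_true]
          simp only [ihr]
        · intro x
          rw [pvStepA, hcont, if_neg (by simp)]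
          simp only []
          rw [PySem.Set.mem_foldl_add (PySem.List.pyRange m L m) (fun j => j) stA.1 x, ihs x]
          constructor
          · rintro (⟨d, h1, h2, h3, h4, h5⟩ | ⟨b, hb, hxb⟩)
            · exact ⟨d, h1, by omega, h3, h4, h5⟩
            · rw [PySem.List.mem_pyRange_iff_of_pos (by omega : (0:Int) < m)] at hb
              obtain ⟨hb1, hb2, hb3⟩ := hb
              refine ⟨m, by omega, by omega, ?_, by omega, by omega⟩
              rw [hxb]
              simpa using dvd_add hb3 (dvd_refl m)
          · rintro ⟨d, h1, h2, h3, h4, h5⟩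
            by_cases hdm : d < m
            · exact Or.inl ⟨d, h1, hdm, h3, h4, h5⟩
            · have hdm' : d = m := by omega
              refine Or.inr ⟨x, ?_, rfl⟩
              rw [PySem.List.mem_pyRange_iff_of_pos (by omega : (0:Int) < m)]
              refine ⟨by omega, h5, ?_⟩
              have hmx : m ∣ x := hdm' ▸ h3
              exact dvd_sub hmx dvd_rfl

lemma pv_eq (target : Int) :
    highest_prime_factor_under target = highest_prime_factor_under_alt target := by
  rw [highest_prime_factor_under, highest_prime_factor_under_alt]
  set L := pvRoundSqrt target with hL
  by_cases h2 : L <= 2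
  · rw [PySem.List.pyRange_one_eq_nil h2]
    simp
  · have hn : (2:Int) + ((L - 2).toNat : Int) = L := by omega
    have := (pv_inv target L (L - 2).toNat (by omega)).1
    rw [hn] at this
    exact this

-- ===== VERDICT (by name: the statement is the Claim_ definition above) =====
theorem highest_prime_factor_under_spec : Claim_equal_highest_prime_factor_under := by
  intro target _ _
  unfold Spec_highest_prime_factor_under
  exact pv_eq target
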